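-- pv_equiv track=rewrite | github.com/JungTag/Algorithm_Study | CT/NF/4.py | solution
-- ===== SOURCE A (Python) =====
-- def solution(board):
--     SIZE = len(board)
--
--     max_zero_y = [-1, -1] # [y,x]
--     max_zero_x = [-1, -1] # [y,x]
--
--     dp = [[0 for _ in range(SIZE+1)] for _ in range(SIZE+1)]
--
--     dp[1][1] = board[0][0]
--
--     # 0의 최대 영역을 구해준다.
--     for i in range(SIZE):
--         for j in range(SIZE):
--             if board[i][j] == 0:
--                 if i > max_zero_y[0]:
--                     max_zero_y = [i, j]
--                 if j > max_zero_x[1]: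
--                     max_zero_x = [i, j]
--
--     for i in range(1, SIZE+1):
--         for j in range(1, SIZE+1):
--             if i <= max_zero_y[0] and j <= max_zero_x[1]:
--                 # 0의 최대 영역 안에 있다면 절대값을 크게 만든다.
--                 if board[i-1][j-1] != 0:
--                     if i == 1:
--                         dp[i][j] = board[i-1][j-1] + dp[i][j-1]
--                         continue
--                     if j == 1:
--                         dp[i][j] = board[i-1][j-1] + dp[i-1][j]
--                         continue
--
--                     c1, c2 = abs(board[i-1][j-1] + dp[i-1][j]), abs(board[i-1][j-1] + dp[i][j-1])
--
--                     if c1 > c2: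
--                         dp[i][j] = board[i-1][j-1] + dp[i-1][j]
--                     else:
--                         dp[i][j] = board[i-1][j-1] + dp[i][j-1]
--                 else:
--                     dp[i][j] = max(abs(dp[i-1][j]), abs(dp[i][j-1]))
--             else:
--                 # 0의 최대 영역 바깥에 있다면 값을 크게 만든다(양수).
--                 dp[i][j] = board[i-1][j-1] + max(dp[i-1][j], dp[i][j-1])
--
--     answer = dp[SIZE][SIZE]
--
--     return answer
-- ===== SOURCE B (Python) =====
-- def solution(board):
--     # Top-down memoized recursion instead of A's bottom-up dp table; same zero-region scan.
--     n = len(board)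
--
--     zy = [-1, -1]
--     zx = [-1, -1]
--     for i in range(n):
--         for j in range(n):
--             if board[i][j] == 0:
--                 if i > zy[0]:
--                     zy = [i, j]
--                 if j > zx[1]:
--                     zx = [i, j]
--
--     memo = {}
--
--     def rec(i, j):
--         if i == 0 or j == 0:
--             return 0
--         if (i, j) in memo:
--             return memo[(i, j)]
--         b = board[i - 1][j - 1]
--         if i <= zy[0] and j <= zx[1]:
--             if b != 0:
--                 if i == 1:
--                     v = b + rec(i, j - 1)
--                 elif j == 1:
--                     v = b + rec(i - 1, j)
--                 else:
--                     up = b + rec(i - 1, j)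
--                     left = b + rec(i, j - 1)
--                     v = up if abs(up) > abs(left) else left
--             else:
--                 v = max(abs(rec(i - 1, j)), abs(rec(i, j - 1)))
--         else:
--             v = b + max(rec(i - 1, j), rec(i, j - 1))
--         memo[(i, j)] = v
--         return v
--
--     return rec(n, n)
-- ===== Notes on version B (the rewrite author's own statement) =====
-- stated objective: alternative
-- what changed: Replaces A's bottom-up (n+1)x(n+1) dp table filled by nested loops with a top-down memoized recursion rec(i,j) over the same three cases, keeping the zero-region scan.
import Mathlib
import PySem

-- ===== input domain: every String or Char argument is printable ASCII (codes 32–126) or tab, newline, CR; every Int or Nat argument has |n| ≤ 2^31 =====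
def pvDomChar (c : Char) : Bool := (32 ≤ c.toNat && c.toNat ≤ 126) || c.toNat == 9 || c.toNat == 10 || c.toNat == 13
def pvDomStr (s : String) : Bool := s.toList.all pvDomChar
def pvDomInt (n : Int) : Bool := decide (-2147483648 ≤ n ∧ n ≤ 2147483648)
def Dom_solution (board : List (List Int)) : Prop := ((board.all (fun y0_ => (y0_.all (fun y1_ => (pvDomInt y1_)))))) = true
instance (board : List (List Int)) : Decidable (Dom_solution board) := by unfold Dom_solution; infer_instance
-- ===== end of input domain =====

-- B replaces A's bottom-up dp table with a top-down memoized recursion over the same three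
-- cases (objective: alternative decomposition, same O(n²) work).

-- ===== PORT A =====
-- board[i][j] with Int indices; default 0 is only reached outside Pre_solution (Python raises there).
def pvCell (board : List (List Int)) (i j : Int) : Int :=
  PySem.List.pyGetD (PySem.List.pyGetD board i []) j 0

-- the zero-region scan (this loop is textually identical in A and in B, so both ports call it)
def pvZeroScan (board : List (List Int)) : (Int × Int) × (Int × Int) :=
  (PySem.List.pyRange 0 (PySem.List.len board) 1).foldl (fun z i =>
    (PySem.List.pyRange 0 (PySem.List.len board) 1).foldl (fun z j =>
      if pvCell board i j = 0 then
        ((if i > z.1.1 then (i, j) else z.1), (if j > z.2.2 then (i, j) else z.2))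
      else z) z) ((-1, -1), (-1, -1))

-- dp[r][c] read / write (dp is a rectangular (n+1)×(n+1) table; the loop indices are ≥ 0,
-- so .toNat is exact, and writes are always in range in Python too)
def pvGetD2 (dp : List (List Int)) (r c : Nat) : Int := (dp.getD r []).getD c 0

def pvSet2 (dp : List (List Int)) (r c : Nat) (v : Int) : List (List Int) :=
  dp.set r ((dp.getD r []).set c v)

-- the value A assigns to dp[i][j] (the body of A's double loop, branch for branch)
def pvStepA (board : List (List Int)) (zy zx : Int) (dp : List (List Int)) (i j : Int) : Int :=
  if i ≤ zy ∧ j ≤ zx then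
    if pvCell board (i-1) (j-1) ≠ 0 then
      if i = 1 then pvCell board (i-1) (j-1) + pvGetD2 dp i.toNat (j-1).toNat
      else if j = 1 then pvCell board (i-1) (j-1) + pvGetD2 dp (i-1).toNat j.toNat
      else
        let c1 := |pvCell board (i-1) (j-1) + pvGetD2 dp (i-1).toNat j.toNat|
        let c2 := |pvCell board (i-1) (j-1) + pvGetD2 dp i.toNat (j-1).toNat|
        if c1 > c2 then pvCell board (i-1) (j-1) + pvGetD2 dp (i-1).toNat j.toNat
        else pvCell board (i-1) (j-1) + pvGetD2 dp i.toNat (j-1).toNat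
    else max |pvGetD2 dp (i-1).toNat j.toNat| |pvGetD2 dp i.toNat (j-1).toNat|
  else pvCell board (i-1) (j-1) + max (pvGetD2 dp (i-1).toNat j.toNat) (pvGetD2 dp i.toNat (j-1).toNat)

def solution (board : List (List Int)) : Int :=
  let SIZE : Int := PySem.List.len board
  let z := pvZeroScan board
  let dp0 : List (List Int) :=
    List.replicate (board.length + 1) (List.replicate (board.length + 1) 0)
  let dp1 := pvSet2 dp0 1 1 (pvCell board 0 0)
  let dp := (PySem.List.pyRange 1 (SIZE+1) 1).foldl (fun dp i =>
    (PySem.List.pyRange 1 (SIZE+1) 1).foldl (fun dp j =>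
      pvSet2 dp i.toNat j.toNat (pvStepA board z.1.1 z.2.2 dp i j)) dp) dp1
  PySem.List.pyGetD (PySem.List.pyGetD dp SIZE []) SIZE 0

-- ===== PORT B =====
-- rec(i, j) of Source B (1-indexed); memoization only caches, so the port is the bare recursion
def pvRec (board : List (List Int)) (zy zx : Int) : Nat → Nat → Int
  | 0, _ => 0
  | _+1, 0 => 0
  | i+1, j+1 =>
    let b := pvCell board (i : Int) (j : Int)
    if ((i : Int) + 1 ≤ zy ∧ (j : Int) + 1 ≤ zx) then
      if b ≠ 0 then
        if i = 0 then b + pvRec board zy zx (i+1) j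
        else if j = 0 then b + pvRec board zy zx i (j+1)
        else
          let up := b + pvRec board zy zx i (j+1)
          let left := b + pvRec board zy zx (i+1) j
          if |up| > |left| then up else left
      else max |pvRec board zy zx i (j+1)| |pvRec board zy zx (i+1) j|
    else b + max (pvRec board zy zx i (j+1)) (pvRec board zy zx (i+1) j)
  termination_by i j => i + j

def solution_alt (board : List (List Int)) : Int :=
  let z := pvZeroScan board
  pvRec board z.1.1 z.2.2 board.length board.length

-- ===== PRECONDITION & SPEC =====
-- A raises IndexError on the empty board and whenever some row is shorter than the board
-- (board[i][j] for i, j < len(board)); Pre_ excludes exactly those.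
def Pre_solution (board : List (List Int)) : Prop :=
  board ≠ [] ∧ ∀ row ∈ board, board.length ≤ row.length
instance (board : List (List Int)) : Decidable (Pre_solution board) := by
  unfold Pre_solution; infer_instance

def pvWitness_solution : List (List Int) := [[1, 2], [0, 3]]

def Spec_solution (board : List (List Int)) (out : Int) : Prop := out = solution_alt board
instance (board : List (List Int)) (out : Int) : Decidable (Spec_solution board out) := by
  unfold Spec_solution; infer_instance

-- ===== CLAIM (what is proved, stated in full; the proofs are below) =====
def Claim_equal_solution : Prop := ∀ (board : List (List Int)), Dom_solution board → Pre_solution board → Spec_solution board (solution board)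

-- ===== LEMMAS AND PROOFS =====

def pvShape (n : Nat) (dp : List (List Int)) : Prop :=
  dp.length = n + 1 ∧ ∀ row ∈ dp, row.length = n + 1

-- rows ≤ i are finished through column m (rows < i fully; row i through column m; borders 0)
def pvInv (board : List (List Int)) (zy zx : Int) (n i m : Nat) (dp : List (List Int)) : Prop :=
  ∀ r c : Nat, r ≤ n → c ≤ n → (r = 0 ∨ c = 0 ∨ r < i ∨ (r = i ∧ c ≤ m)) →
    pvGetD2 dp r c = pvRec board zy zx r c

lemma pvRec_left_zero (board : List (List Int)) (zy zx : Int) (c : Nat) :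
    pvRec board zy zx 0 c = 0 := by simp [pvRec]

lemma pvRec_bot_zero (board : List (List Int)) (zy zx : Int) (r : Nat) :
    pvRec board zy zx r 0 = 0 := by cases r <;> simp [pvRec]

lemma pvShape_set2 (n r c : Nat) (v : Int) (dp : List (List Int))
    (h : pvShape n dp) (hr : r ≤ n) : pvShape n (pvSet2 dp r c v) := by
  obtain ⟨h1, h2⟩ := h
  refine ⟨by simp [pvSet2, h1], ?_⟩
  intro row hrow
  rcases List.mem_or_eq_of_mem_set hrow with h' | h'
  · exact h2 row h'
  · subst h'
    have hlt : r < dp.length := by omega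
    rw [List.getD_eq_getElem?_getD, List.getElem?_eq_getElem hlt]
    simp [h2 _ (List.getElem_mem hlt)]

lemma pvGet2_set2 (n r c r' c' : Nat) (v : Int) (dp : List (List Int))
    (h : pvShape n dp) (hr : r ≤ n) (hc : c ≤ n) :
    pvGetD2 (pvSet2 dp r c v) r' c' =
      if r' = r ∧ c' = c then v else pvGetD2 dp r' c' := by
  obtain ⟨h1, h2⟩ := h
  have hrl : r < dp.length := by omega
  have hcl : c < (dp.getD r []).length := by
    rw [List.getD_eq_getElem?_getD, List.getElem?_eq_getElem hrl]
    have := h2 _ (List.getElem_mem hrl)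
    simp [this]; omega
  unfold pvGetD2 pvSet2
  by_cases hrr : r = r' <;> by_cases hcc : c = c' <;>
    simp_all [List.getD_eq_getElem?_getD] <;> intros <;> simp_all

lemma pvStep_eq_rec (board : List (List Int)) (zy zx : Int) (n k l : Nat) (dp : List (List Int))
    (hk : k < n) (hl : l < n)
    (Hdp : pvInv board zy zx n (k+1) l dp) :
    pvStepA board zy zx dp (1 + (k:Int)) (1 + (l:Int)) = pvRec board zy zx (k+1) (l+1) := by
  have hup : pvGetD2 dp k (l+1) = pvRec board zy zx k (l+1) :=
    Hdp k (l+1) (by omega) (by omega) (by omega)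
  have hleft : pvGetD2 dp (k+1) l = pvRec board zy zx (k+1) l :=
    Hdp (k+1) l (by omega) (by omega) (by omega)
  rw [show (1:Int) + (k:Int) = (k:Int) + 1 from by ring,
      show (1:Int) + (l:Int) = (l:Int) + 1 from by ring]
  rw [pvStepA, pvRec]
  simp only [show ((k:Int)+1) - 1 = (k:Int) from by ring,
      show ((l:Int)+1) - 1 = (l:Int) from by ring,
      show ((k:Int)+1).toNat = k + 1 from by omega,
      show ((l:Int)+1).toNat = l + 1 from by omega,
      Int.toNat_natCast, hup, hleft,
      show (((k:Int)+1 = 1) ↔ (k = 0)) from by omega,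
      show (((l:Int)+1 = 1) ↔ (l = 0)) from by omega]

lemma pvGet2_replicate (n r c : Nat) :
    pvGetD2 (List.replicate (n+1) (List.replicate (n+1) (0:Int))) r c = 0 := by
  unfold pvGetD2
  simp only [List.getD_eq_getElem?_getD, List.getElem?_replicate]
  split
  · simp_all [List.getElem?_replicate]
    split <;> simp_all
  · simp_all

lemma pvRec_border (board : List (List Int)) (zy zx : Int) (r c : Nat)
    (h : r = 0 ∨ c = 0) : pvRec board zy zx r c = 0 := by
  rcases h with h | h <;> subst h
  · exact pvRec_left_zero board zy zx c
  · exact pvRec_bot_zero board zy zx r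

lemma pvInner_loop (board : List (List Int)) (zy zx : Int) (n k : Nat) (hk : k < n) :
    ∀ (m : Nat), m ≤ n → ∀ dp, pvShape n dp → pvInv board zy zx n (k+1) 0 dp →
      pvShape n ((List.range m).foldl
        (fun dp (l : Nat) => pvSet2 dp ((1:Int)+(k:Int)).toNat ((1:Int)+(l:Int)).toNat
          (pvStepA board zy zx dp (1+(k:Int)) (1+(l:Int)))) dp) ∧
      pvInv board zy zx n (k+1) m ((List.range m).foldl
        (fun dp (l : Nat) => pvSet2 dp ((1:Int)+(k:Int)).toNat ((1:Int)+(l:Int)).toNat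
          (pvStepA board zy zx dp (1+(k:Int)) (1+(l:Int)))) dp) := by
  intro m
  induction m with
  | zero =>
    intro _ dp hs hinv
    refine ⟨hs, ?_⟩
    intro r c hr hc hd
    exact hinv r c hr hc (by omega)
  | succ m ih =>
    intro hm dp hs hinv
    have ⟨hs', hinv'⟩ := ih (by omega) dp hs hinv
    rw [List.range_succ, List.foldl_append, List.foldl_cons, List.foldl_nil]
    set dpm := (List.range m).foldl
        (fun dp (l : Nat) => pvSet2 dp ((1:Int)+(k:Int)).toNat ((1:Int)+(l:Int)).toNat
          (pvStepA board zy zx dp (1+(k:Int)) (1+(l:Int)))) dp with hdpm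
    have e1 : ((1:Int)+(k:Int)).toNat = k + 1 := by omega
    have e2 : ((1:Int)+(m:Int)).toNat = m + 1 := by omega
    have hv : pvStepA board zy zx dpm (1+(k:Int)) (1+(m:Int)) = pvRec board zy zx (k+1) (m+1) :=
      pvStep_eq_rec board zy zx n k m dpm hk (by omega) hinv'
    rw [e1, e2, hv]
    refine ⟨pvShape_set2 n (k+1) (m+1) _ dpm hs' (by omega), ?_⟩
    intro r c hr hc hd
    rw [pvGet2_set2 n (k+1) (m+1) r c _ dpm hs' (by omega) (by omega)]
    by_cases hrc : r = k + 1 ∧ c = m + 1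
    · rw [if_pos hrc, hrc.1, hrc.2]
    · rw [if_neg hrc]
      exact hinv' r c hr hc (by omega)

lemma pvInv_next_row (board : List (List Int)) (zy zx : Int) (n i : Nat)
    (dp : List (List Int)) (h : pvInv board zy zx n i n dp) :
    pvInv board zy zx n (i+1) 0 dp := by
  intro r c hr hc hd
  exact h r c hr hc (by omega)

lemma pvOuter_loop (board : List (List Int)) (zy zx : Int) (n : Nat) :
    ∀ (m : Nat), m ≤ n → ∀ dp, pvShape n dp → pvInv board zy zx n 1 0 dp →
      pvShape n ((List.range m).foldl
        (fun dp (k : Nat) => (List.range n).foldl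
          (fun dp (l : Nat) => pvSet2 dp ((1:Int)+(k:Int)).toNat ((1:Int)+(l:Int)).toNat
            (pvStepA board zy zx dp (1+(k:Int)) (1+(l:Int)))) dp) dp) ∧
      pvInv board zy zx n (m+1) 0 ((List.range m).foldl
        (fun dp (k : Nat) => (List.range n).foldl
          (fun dp (l : Nat) => pvSet2 dp ((1:Int)+(k:Int)).toNat ((1:Int)+(l:Int)).toNat
            (pvStepA board zy zx dp (1+(k:Int)) (1+(l:Int)))) dp) dp) := by
  intro m
  induction m with
  | zero => intro _ dp hs hinv; exact ⟨hs, hinv⟩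
  | succ m ih =>
    intro hm dp hs hinv
    have ⟨hs', hinv'⟩ := ih (by omega) dp hs hinv
    rw [List.range_succ, List.foldl_append, List.foldl_cons, List.foldl_nil]
    have ⟨hs'', hinv''⟩ := pvInner_loop board zy zx n m (by omega) n (le_refl n) _ hs' hinv'
    exact ⟨hs'', pvInv_next_row board zy zx n (m+1) _ hinv''⟩

-- ===== VERDICT (by name: the statement is the Claim_ definition above) =====
theorem solution_spec : Claim_equal_solution := by
  intro board _hdom hpre
  unfold Spec_solution
  obtain ⟨hne, _hrows⟩ := hpre
  have hn1 : 0 < board.length := List.length_pos_iff.mpr hne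
  unfold solution solution_alt
  simp only [PySem.List.len_eq]
  set n := board.length with hn
  set zy := (pvZeroScan board).1.1 with hzy
  set zx := (pvZeroScan board).2.2 with hzx
  rw [PySem.List.pyRange_one]
  rw [show (((n:Int)+1) - 1).toNat = n from by omega]
  simp only [List.foldl_map]
  set dp0 : List (List Int) :=
    List.replicate (n + 1) (List.replicate (n + 1) 0) with hdp0
  set dp1 := pvSet2 dp0 1 1 (pvCell board 0 0) with hdp1
  have hs0 : pvShape n dp0 := by
    refine ⟨by simp [hdp0], ?_⟩
    intro row hrow
    rw [hdp0] at hrow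
    rw [List.eq_of_mem_replicate hrow]
    simp
  have hs1 : pvShape n dp1 := pvShape_set2 n 1 1 _ dp0 hs0 (by omega)
  have hinv1 : pvInv board zy zx n 1 0 dp1 := by
    intro r c hr hc hd
    rw [hdp1, pvGet2_set2 n 1 1 r c _ dp0 hs0 (by omega) (by omega),
        if_neg (by omega), hdp0, pvGet2_replicate, pvRec_border board zy zx r c (by omega)]
  obtain ⟨hsF, hinvF⟩ := pvOuter_loop board zy zx n n (le_refl n) dp1 hs1 hinv1
  rw [PySem.List.pyGetD_natCast, PySem.List.pyGetD_natCast]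
  exact hinvF n n (le_refl n) (le_refl n) (by omega)
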